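-- pv_equiv track=rewrite | github.com/saintsim/adventofcode-2020 | src/day04/part1.py | parse_passport_data
-- ===== SOURCE A (Python) =====
-- def parse_passport_data(lines):
--     passports = []
--     passport = dict()
--     for line in lines:
--         if line == "\n":
--             passports.append(passport)
--             passport = dict()
--             continue
--         for token in line.split(" "):
--             token = token.strip()
--             key, value = token.split(":")
--             if key != "cid":
--                 passport[key] = value
--     passports.append(passport)
--     return passports
-- ===== SOURCE B (Python) =====
-- def _build(block):
--     tokens = [t for line in block for t in line.split(" ")]
--     d = {}
--     for parts in (t.strip().split(":") for t in tokens):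
--         k, v = parts
--         if k != "cid":
--             d[k] = v
--     return d
--
--
-- def parse_passport_data(lines):
--     passports = []
--     pos, n = 0, len(lines)
--     while pos <= n:
--         block = []
--         while pos < n and lines[pos] != "\n":
--             block.append(lines[pos])
--             pos += 1
--         passports.append(_build(block))
--         pos += 1
--     return passports
-- ===== Notes on version B (the rewrite author's own statement) =====
-- stated objective: alternative
-- what changed: Replaces A's single fold carrying a mutable running dict by an index-cursor segmentation: an outer while loop repeatedly consumes one maximal separator-free block of lines (inner cursor loop), then builds that passport independently from the block's flattened token list.
import Mathlib
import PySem

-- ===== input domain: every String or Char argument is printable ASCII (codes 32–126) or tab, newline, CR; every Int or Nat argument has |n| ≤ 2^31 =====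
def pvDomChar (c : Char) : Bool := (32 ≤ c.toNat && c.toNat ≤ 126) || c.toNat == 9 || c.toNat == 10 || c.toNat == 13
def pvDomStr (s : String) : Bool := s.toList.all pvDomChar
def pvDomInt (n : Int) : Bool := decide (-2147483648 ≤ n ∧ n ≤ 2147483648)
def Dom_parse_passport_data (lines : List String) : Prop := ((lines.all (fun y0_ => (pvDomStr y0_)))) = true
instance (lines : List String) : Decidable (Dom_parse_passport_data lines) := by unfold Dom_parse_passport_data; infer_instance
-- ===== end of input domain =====

-- B replaces A's single fold with a running dict by cursor-driven block segmentation: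
-- consume one maximal separator-free block at a time, build each passport independently.
-- Equivalence is over the RETURN value; neither program mutates its argument.

-- ===== PORT A =====
-- A: one left fold over the lines carrying (passports, passport); a separator line flushes
-- the running dict, any other line folds its space-split tokens into the running dict
-- ('token.strip(); key, value = token.split(":"); if key != "cid": passport[key] = value';
-- tokens whose split is not exactly two parts raise ValueError in Python — excluded by Pre_,
-- the port leaves the dict unchanged there).
def parse_passport_data (lines : List String) : List (List (String × String)) :=
  let st := lines.foldl
    (fun (st : List (List (String × String)) × PySem.Dict String String) line =>
      if line = "\n" then (st.1 ++ [st.2.items], PySem.Dict.empty)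
      else (st.1, ((PySem.Str.split? line " ").getD []).foldl
        (fun d token =>
          match (PySem.Str.split? (PySem.Str.strip token) ":").getD [] with
          | [k, v] => if k ≠ "cid" then d.insert k v else d
          | _ => d)
        st.2))
    ([], PySem.Dict.empty)
  st.1 ++ [st.2.items]

-- ===== PORT B =====
-- Source B's '_build(block)': flatten the block into its space-split tokens, then fold the
-- stripped-and-":"-split parts into a fresh dict (non-2-part tokens raise in Python; Pre_
-- excludes them, the port skips them).
def pvBuildB (block : List String) : PySem.Dict String String :=
  let tokens := block.flatMap (fun line => (PySem.Str.split? line " ").getD [])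
  (tokens.map (fun t => (PySem.Str.split? (PySem.Str.strip t) ":").getD [])).foldl
    (fun d parts =>
      -- 'k, v = parts': exactly-two unpack, ported match-free (length test + indexed
      -- reads; otherwise Python raises ValueError — Pre_ excludes that, the port skips)
      if parts.length = 2 then
        let k := parts.getD 0 ""
        let v := parts.getD 1 ""
        if k ≠ "cid" then d.insert k v else d
      else d)
    PySem.Dict.empty

-- Source B's inner cursor loop 'while pos < n and lines[pos] != "\n"', ported on the suffix
-- lines[pos:] (exact: pos only advances, lines is never mutated): returns the maximal
-- separator-free prefix and the remaining suffix (which starts with "\n" unless empty).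
def pvInner : List String → List String × List String
  | [] => ([], [])
  | l :: ls =>
    if l = "\n" then ([], l :: ls)
    else
      let (b, r) := pvInner ls
      (l :: b, r)

theorem pvInner_snd_le (ls : List String) : (pvInner ls).2.length ≤ ls.length := by
  induction ls with
  | nil => simp [pvInner]
  | cons l ls ih =>
    by_cases h : l = "\n" <;> simp [pvInner, h]
    omega

-- Source B's outer while loop: one iteration per block; after a flush the cursor skips the
-- separator ('pos += 1'), and the loop runs once more past the end ('pos <= n'), so the
-- final (possibly empty) block is always emitted.
def pvOuter (rest : List String) : List (List (String × String)) :=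
  match h : pvInner rest with
  | (b, []) => [(pvBuildB b).items]
  | (b, _ :: r') => (pvBuildB b).items :: pvOuter r'
termination_by rest.length
decreasing_by
  have hle := pvInner_snd_le rest
  rw [h] at hle
  simp at hle
  omega

def parse_passport_data_alt (lines : List String) : List (List (String × String)) :=
  pvOuter lines

-- ===== PRECONDITION & SPEC =====
-- Pre_ excludes exactly the inputs where the Python A raises ValueError: a non-separator line
-- holding a token that does not split on ":" into exactly two parts (e.g. [""], ["a b:c\n"]).
def Pre_parse_passport_data (lines : List String) : Prop :=
  ∀ line ∈ lines, line = "\n" ∨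
    ∀ tok ∈ (PySem.Str.split? line " ").getD [],
      ((PySem.Str.split? (PySem.Str.strip tok) ":").getD []).length = 2
instance (lines : List String) : Decidable (Pre_parse_passport_data lines) := by
  unfold Pre_parse_passport_data; infer_instance

def pvWitness_parse_passport_data : List String :=
  ["ecl:gry pid:860033327\n", "byr:1937 cid:147\n", "\n", "hcl:#ae17e1\n"]

def Spec_parse_passport_data (lines : List String) (out : List (List (String × String))) : Prop := out = parse_passport_data_alt lines
instance (lines : List String) (out : List (List (String × String))) : Decidable (Spec_parse_passport_data lines out) := by unfold Spec_parse_passport_data; infer_instance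

-- ===== CLAIM (what is proved, stated in full; the proofs are below) =====
def Claim_equal_parse_passport_data : Prop := ∀ (lines : List String), Dom_parse_passport_data lines → Pre_parse_passport_data lines → Spec_parse_passport_data lines (parse_passport_data lines)

-- ===== LEMMAS AND PROOFS =====

-- A's per-line dict update, named for the proofs
def pvProcLine (d : PySem.Dict String String) (line : String) : PySem.Dict String String :=
  ((PySem.Str.split? line " ").getD []).foldl
    (fun d token =>
      match (PySem.Str.split? (PySem.Str.strip token) ":").getD [] with
      | [k, v] => if k ≠ "cid" then d.insert k v else d
      | _ => d)
    d

-- characterization of A's fold: the remaining lines processed with running dict d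
def pvChunks (d : PySem.Dict String String) : List String → List (List (String × String))
  | [] => [d.items]
  | l :: ls =>
    if l = "\n" then d.items :: pvChunks PySem.Dict.empty ls
    else pvChunks (pvProcLine d l) ls

theorem pvA_chunks (ls : List String) :
    ∀ (ps : List (List (String × String))) (d : PySem.Dict String String),
    (let st := ls.foldl
        (fun (st : List (List (String × String)) × PySem.Dict String String) line =>
          if line = "\n" then (st.1 ++ [st.2.items], PySem.Dict.empty)
          else (st.1, pvProcLine st.2 line)) (ps, d)
     st.1 ++ [st.2.items]) = ps ++ pvChunks d ls := by
  induction ls with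
  | nil => intro ps d; simp [pvChunks]
  | cons l ls ih =>
    intro ps d
    by_cases h : l = "\n" <;> simp [pvChunks, h, ih]

-- B's block build from dict d equals A's line-by-line processing from d
theorem pvBuildB_foldl (b : List String) :
    ∀ d, (let tokens := b.flatMap (fun line => (PySem.Str.split? line " ").getD [])
          (tokens.map (fun t => (PySem.Str.split? (PySem.Str.strip t) ":").getD [])).foldl
            (fun d parts =>
              if parts.length = 2 then
                let k := parts.getD 0 ""
                let v := parts.getD 1 ""
                if k ≠ "cid" then d.insert k v else d
              else d) d)
          = b.foldl pvProcLine d := by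
  induction b with
  | nil => intro d; simp
  | cons l ls ih =>
    intro d
    simp only [List.flatMap_cons, List.map_append, List.foldl_append, List.foldl_cons, ih]
    simp only [pvProcLine, List.foldl_map]
    have hfun : (fun (x : PySem.Dict String String) (y : String) =>
        let parts := (PySem.Str.split? (PySem.Str.strip y) ":").getD []
        if parts.length = 2 then
          let k := parts.getD 0 ""
          let v := parts.getD 1 ""
          if k ≠ "cid" then x.insert k v else x
        else x)
      = (fun (x : PySem.Dict String String) (y : String) =>
        match (PySem.Str.split? (PySem.Str.strip y) ":").getD [] with
        | [k, v] => if k ≠ "cid" then x.insert k v else x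
        | _ => x) := by
      funext x y
      cases hp : (PySem.Str.split? (PySem.Str.strip y) ":").getD [] with
      | nil => rfl
      | cons k rest =>
        cases rest with
        | nil => rfl
        | cons v rest2 => cases rest2 <;> simp
    rw [hfun]

-- one outer-loop step of B, expressed through pvChunks with running dict d
theorem pvChunks_inner (ls : List String) :
    ∀ d, pvChunks d ls =
      (match pvInner ls with
       | (b, []) => [(b.foldl pvProcLine d).items]
       | (b, _ :: r') => (b.foldl pvProcLine d).items :: pvChunks PySem.Dict.empty r') := by
  induction ls with
  | nil => intro d; simp [pvInner, pvChunks]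
  | cons l ls ih =>
    intro d
    by_cases h : l = "\n"
    · simp [pvInner, pvChunks, h]
    · simp only [pvInner, if_neg h, pvChunks]
      rw [ih (pvProcLine d l)]
      cases hi : pvInner ls with
      | mk b r => cases r <;> simp

theorem pvBuildB_eq (b : List String) :
    pvBuildB b = b.foldl pvProcLine PySem.Dict.empty := by
  simpa [pvBuildB] using pvBuildB_foldl b PySem.Dict.empty

theorem pvOuter_eq_chunks (rest : List String) :
    pvOuter rest = pvChunks PySem.Dict.empty rest := by
  induction rest using pvOuter.induct with
  | case1 rest b h =>
    rw [pvOuter, h, pvChunks_inner rest PySem.Dict.empty, h]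
    show [(pvBuildB b).items] = [(b.foldl pvProcLine PySem.Dict.empty).items]
    rw [pvBuildB_eq]
  | case2 rest b x r' h ih =>
    rw [pvOuter, h, pvChunks_inner rest PySem.Dict.empty, h]
    show (pvBuildB b).items :: pvOuter r'
        = (b.foldl pvProcLine PySem.Dict.empty).items :: pvChunks PySem.Dict.empty r'
    rw [pvBuildB_eq, ih]

-- ===== VERDICT (by name: the statement is the Claim_ definition above) =====
theorem parse_passport_data_spec : Claim_equal_parse_passport_data := by
  intro lines _ _
  show parse_passport_data lines = parse_passport_data_alt lines
  exact (pvA_chunks lines [] PySem.Dict.empty).trans (pvOuter_eq_chunks lines).symm
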